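-- pv_equiv track=rewrite | github.com/thismatters/Rigid-Body-Solutions | rigidbodies.py | cullDuplicateCalculations
-- ===== SOURCE A (Python) =====
-- def cullDuplicateCalculations(calculations):
-- 	culledOne = True
-- 	while culledOne:
-- 		culledOne = False
-- 		numCalcs = len(calculations)
-- 		for i in range(0, numCalcs):
-- 			for j in range(0, numCalcs):
-- 				if i == j:
-- 					continue
-- 				if calculations[i][2] == calculations[j][2] and calculations[i][3] == calculations[j][3]:
-- 					if calculations[i][0] == calculations[j][1] and calculations[i][1] == calculations[j][0]:
-- 						calculations.pop(j)
-- 						culledOne=True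
-- 						break;
-- 			if culledOne:
-- 				break
-- 	return(calculations)
-- ===== SOURCE B (Python) =====
-- def cullDuplicateCalculations(calculations):
-- 	seen = set()
-- 	result = []
-- 	for calc in calculations:
-- 		if (calc[1], calc[0], calc[2], calc[3]) in seen:
-- 			continue
-- 		result.append(calc)
-- 		seen.add((calc[0], calc[1], calc[2], calc[3]))
-- 	calculations[:] = result
-- 	return calculations
-- ===== Notes on version B (the rewrite author's own statement) =====
-- stated objective: faster
-- what changed: Replaces A's restarting O(n^3) rescan-and-pop nested loops with a single forward pass that keeps an element unless the reversed key (e1,e0,e2,e3) of its first four entries is already in a hash set of kept keys, then assigns the survivors back in place.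
-- outside the precondition, e.g. on cullDuplicateCalculations([[1]]): A returns [[1]], B raises IndexError; on cullDuplicateCalculations([[1, 2, 3, 4], [9, 9, 5]]): A returns [[1, 2, 3, 4], [9, 9, 5]], B raises IndexError
import Mathlib
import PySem

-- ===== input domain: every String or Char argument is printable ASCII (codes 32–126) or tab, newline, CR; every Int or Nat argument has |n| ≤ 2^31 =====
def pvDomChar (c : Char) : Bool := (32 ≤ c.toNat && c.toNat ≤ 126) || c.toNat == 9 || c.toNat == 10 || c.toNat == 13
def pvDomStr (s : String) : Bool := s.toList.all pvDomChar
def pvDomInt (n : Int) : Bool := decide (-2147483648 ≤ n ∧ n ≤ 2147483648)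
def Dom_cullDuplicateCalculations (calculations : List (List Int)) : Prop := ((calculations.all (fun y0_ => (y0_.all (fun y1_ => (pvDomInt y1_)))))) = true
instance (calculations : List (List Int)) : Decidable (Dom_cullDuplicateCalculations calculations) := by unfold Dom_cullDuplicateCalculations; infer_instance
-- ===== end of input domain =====

-- B replaces A's restarting O(n^3) rescan-and-pop with one forward pass over a hash set of kept
-- keys (objective: faster). A mutates its argument in place; the equivalence proved here is about
-- the RETURN value only (B performs the analogous in-place assignment in Python).


-- ===== PORT A =====
-- Python's `calculations[i][2] == calculations[j][2] and … and calculations[i][1] == calculations[j][0]`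
-- (the two nested ifs), in A's comparison order; element indexing via pyGetD (exact under Pre_).
def pvMatch (a b : List Int) : Bool :=
  (PySem.List.pyGetD a 2 0 == PySem.List.pyGetD b 2 0) &&
  (PySem.List.pyGetD a 3 0 == PySem.List.pyGetD b 3 0) &&
  (PySem.List.pyGetD a 0 0 == PySem.List.pyGetD b 1 0) &&
  (PySem.List.pyGetD a 1 0 == PySem.List.pyGetD b 0 0)

-- the inner `for j in range(0, numCalcs)` loop: first j ≠ i whose pair matches, else none
-- (count = how many values of j remain; the initial call passes count = numCalcs, j = 0)
def pvFindJ (cs : List (List Int)) (i : Nat) : Nat → Nat → Option Nat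
  | 0, _ => none
  | count+1, j =>
      if i = j then pvFindJ cs i count (j+1)
      else if pvMatch (cs.getD i []) (cs.getD j []) then some j
      else pvFindJ cs i count (j+1)

-- the outer `for i in range(0, numCalcs)` loop: the index j popped by this while-iteration, if any
def pvFindI (cs : List (List Int)) : Nat → Nat → Option Nat
  | 0, _ => none
  | count+1, i =>
      match pvFindJ cs i cs.length 0 with
      | some j => some j
      | none => pvFindI cs count (i+1)

-- the `while culledOne:` loop: each iteration pops the found index and rescans;
-- each pop shortens the list, so length+1 iterations always suffice (proved in pvLoop_eq)
def pvCullLoop : Nat → List (List Int) → List (List Int)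
  | 0, cs => cs
  | fuel+1, cs =>
      match pvFindI cs cs.length 0 with
      | none => cs
      | some j => pvCullLoop fuel (cs.eraseIdx j)

def cullDuplicateCalculations (calculations : List (List Int)) : List (List Int) :=
  pvCullLoop (calculations.length + 1) calculations

-- ===== PORT B =====
-- (calc[0], calc[1], calc[2], calc[3]) and (calc[1], calc[0], calc[2], calc[3]) of Source B
def pvKey (c : List Int) : Int × Int × Int × Int :=
  (PySem.List.pyGetD c 0 0, PySem.List.pyGetD c 1 0, PySem.List.pyGetD c 2 0, PySem.List.pyGetD c 3 0)
def pvRKey (c : List Int) : Int × Int × Int × Int :=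
  (PySem.List.pyGetD c 1 0, PySem.List.pyGetD c 0 0, PySem.List.pyGetD c 2 0, PySem.List.pyGetD c 3 0)

-- one iteration of Source B's single `for calc in calculations` loop, state = (result, seen)
def pvCullStep (acc : List (List Int) × PySem.Set (Int × Int × Int × Int)) (c : List Int) :
    List (List Int) × PySem.Set (Int × Int × Int × Int) :=
  if PySem.Set.contains acc.2 (pvRKey c) then acc
  else (acc.1 ++ [c], PySem.Set.add acc.2 (pvKey c))

def cullDuplicateCalculations_alt (calculations : List (List Int)) : List (List Int) :=
  (calculations.foldl pvCullStep ([], PySem.Set.empty)).1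

-- ===== PRECONDITION & SPEC =====
-- Pre_ excludes lists containing an element with fewer than 4 entries: there Python A raises
-- IndexError, except when the list has at most one element or comparison short-circuiting
-- accidentally skips the missing entry and A returns (see claim.json cites); B (which always
-- builds the full 4-entry keys) raises IndexError on all such lists.
def Pre_cullDuplicateCalculations (calculations : List (List Int)) : Prop :=
  ∀ c ∈ calculations, 4 ≤ c.length
instance (calculations : List (List Int)) : Decidable (Pre_cullDuplicateCalculations calculations) := by
  unfold Pre_cullDuplicateCalculations; infer_instance

def pvWitness_cullDuplicateCalculations : List (List Int) := [[1, 2, 3, 4], [2, 1, 3, 4]]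

def Spec_cullDuplicateCalculations (calculations : List (List Int)) (out : List (List Int)) : Prop := out = cullDuplicateCalculations_alt calculations
instance (calculations : List (List Int)) (out : List (List Int)) : Decidable (Spec_cullDuplicateCalculations calculations out) := by unfold Spec_cullDuplicateCalculations; infer_instance

-- ===== CLAIM (what is proved, stated in full; the proofs are below) =====
def Claim_equal_cullDuplicateCalculations : Prop := ∀ (calculations : List (List Int)), Dom_cullDuplicateCalculations calculations → Pre_cullDuplicateCalculations calculations → Spec_cullDuplicateCalculations calculations (cullDuplicateCalculations calculations)

-- ===== LEMMAS AND PROOFS =====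

theorem pvMatch_iff {a b : List Int} : pvMatch a b = true ↔ pvKey a = pvRKey b := by
  simp [pvMatch, pvKey, pvRKey, Prod.ext_iff]; tauto

theorem pvMatch_symm {a b : List Int} : pvKey a = pvRKey b ↔ pvKey b = pvRKey a := by
  simp [pvKey, pvRKey, Prod.ext_iff]; tauto

theorem pvFindJ_none {cs : List (List Int)} {i : Nat} :
    ∀ {count j0 : Nat}, pvFindJ cs i count j0 = none →
    ∀ j', j0 ≤ j' → j' < j0 + count → j' ≠ i → pvMatch (cs.getD i []) (cs.getD j' []) = false := by
  intro count
  induction count with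
  | zero => intro j0 h j' h1 h2 h3; omega
  | succ count ih =>
      intro j0 h j' h1 h2 h3
      rw [pvFindJ] at h
      by_cases hij : i = j0
      · rw [if_pos hij] at h
        rcases Nat.eq_or_lt_of_le h1 with rfl | hlt
        · omega
        · exact ih h j' hlt (by omega) h3
      · rw [if_neg hij] at h
        by_cases hmm : pvMatch (cs.getD i []) (cs.getD j0 []) = true
        · rw [if_pos hmm] at h; exact absurd h (by simp)
        · rw [if_neg hmm] at h
          rcases Nat.eq_or_lt_of_le h1 with rfl | hlt
          · simpa using hmm
          · exact ih h j' hlt (by omega) h3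

theorem pvFindJ_some {cs : List (List Int)} {i : Nat} :
    ∀ {count j0 j : Nat}, pvFindJ cs i count j0 = some j →
    j < j0 + count ∧ j ≠ i ∧ pvMatch (cs.getD i []) (cs.getD j []) = true := by
  intro count
  induction count with
  | zero => intro j0 j h; rw [pvFindJ] at h; exact absurd h (by simp)
  | succ count ih =>
      intro j0 j h
      rw [pvFindJ] at h
      by_cases hij : i = j0
      · rw [if_pos hij] at h
        obtain ⟨ha, hb, hc⟩ := ih h
        exact ⟨by omega, hb, hc⟩
      · rw [if_neg hij] at h
        by_cases hmm : pvMatch (cs.getD i []) (cs.getD j0 []) = true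
        · rw [if_pos hmm] at h; cases h
          exact ⟨by omega, fun hh => hij hh.symm, hmm⟩
        · rw [if_neg hmm] at h
          obtain ⟨ha, hb, hc⟩ := ih h
          exact ⟨by omega, hb, hc⟩

theorem pvFindI_none {cs : List (List Int)} :
    ∀ {count i0 : Nat}, pvFindI cs count i0 = none →
    ∀ i, i0 ≤ i → i < i0 + count → pvFindJ cs i cs.length 0 = none := by
  intro count
  induction count with
  | zero => intro i0 h i h1 h2; omega
  | succ count ih =>
      intro i0 h i h1 h2
      rw [pvFindI] at h
      cases hj : pvFindJ cs i0 cs.length 0 with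
      | some j => rw [hj] at h; exact absurd h (by simp)
      | none =>
          rw [hj] at h
          rcases Nat.eq_or_lt_of_le h1 with rfl | hlt
          · exact hj
          · exact ih h i hlt (by omega)

theorem pvFindI_some {cs : List (List Int)} :
    ∀ {count i0 j : Nat}, pvFindI cs count i0 = some j →
    ∃ i, i0 ≤ i ∧ i < i0 + count ∧ pvFindJ cs i cs.length 0 = some j ∧
      ∀ k, i0 ≤ k → k < i → pvFindJ cs k cs.length 0 = none := by
  intro count
  induction count with
  | zero => intro i0 j h; rw [pvFindI] at h; exact absurd h (by simp)
  | succ count ih =>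
      intro i0 j h
      rw [pvFindI] at h
      cases hj : pvFindJ cs i0 cs.length 0 with
      | some j0 =>
          rw [hj] at h; cases h
          exact ⟨i0, le_refl _, by omega, hj, fun k h1 h2 => absurd h1 (by omega)⟩
      | none =>
          rw [hj] at h
          obtain ⟨i', h1, h2, h3, h4⟩ := ih h
          refine ⟨i', by omega, by omega, h3, fun k hk1 hk2 => ?_⟩
          rcases Nat.eq_or_lt_of_le hk1 with rfl | hlt
          · exact hj
          · exact h4 k hlt hk2

theorem pvCullStep_of_seen {st : List (List Int) × PySem.Set (Int × Int × Int × Int)} {c : List Int}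
    (h : pvRKey c ∈ st.2) : pvCullStep st c = st := by
  unfold pvCullStep; split
  · rfl
  · rename_i hc; exact absurd ((PySem.Set.contains_iff _ _).2 h) hc

theorem pvCullStep_of_not_seen {st : List (List Int) × PySem.Set (Int × Int × Int × Int)} {c : List Int}
    (h : pvRKey c ∉ st.2) : pvCullStep st c = (st.1 ++ [c], PySem.Set.add st.2 (pvKey c)) := by
  unfold pvCullStep; split
  · rename_i hc; exact absurd ((PySem.Set.contains_iff _ _).1 hc) h
  · rfl

-- the seen-set only grows along Source B's loop
theorem pvSeen_mono {t : Int × Int × Int × Int} :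
    ∀ (p : List (List Int)) (st : List (List Int) × PySem.Set (Int × Int × Int × Int)),
      t ∈ st.2 → t ∈ (p.foldl pvCullStep st).2 := by
  intro p
  induction p with
  | nil => intro st h; exact h
  | cons c p ih =>
      intro st h
      simp only [List.foldl_cons]
      apply ih
      unfold pvCullStep
      split
      · exact h
      · exact (PySem.Set.mem_add _ _ _).2 (Or.inl h)

-- an element whose reversed key is already seen after the prefix is dropped by Source B's loop
theorem pvSkip_glue (p1 p2 : List (List Int)) (c : List Int)
    (st : List (List Int) × PySem.Set (Int × Int × Int × Int))
    (h : pvRKey c ∈ (p1.foldl pvCullStep st).2) :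
    (p1 ++ c :: p2).foldl pvCullStep st = (p1 ++ p2).foldl pvCullStep st := by
  rw [List.foldl_append, List.foldl_append, List.foldl_cons, pvCullStep_of_seen h]

-- on a block with no reverse pairs (and none seen), Source B's loop keeps everything
theorem pvKeep_all :
    ∀ (u : List (List Int)) (r : List (List Int)) (s : PySem.Set (Int × Int × Int × Int)),
      (∀ x ∈ u, pvRKey x ∉ s) →
      u.Pairwise (fun x y => pvKey x ≠ pvRKey y) →
      (u.foldl pvCullStep (r, s)).1 = r ++ u ∧
      (∀ t, t ∈ (u.foldl pvCullStep (r, s)).2 ↔ t ∈ s ∨ ∃ x ∈ u, pvKey x = t) := by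
  intro u
  induction u with
  | nil => intro r s _ _; simp
  | cons x u ih =>
      intro r s h1 h2
      have hx : pvRKey x ∉ s := h1 x (List.mem_cons_self ..)
      rw [List.foldl_cons, pvCullStep_of_not_seen hx]
      have hpw := List.pairwise_cons.1 h2
      have h1' : ∀ y ∈ u, pvRKey y ∉ PySem.Set.add s (pvKey x) := by
        intro y hy hmem
        rcases (PySem.Set.mem_add _ _ _).1 hmem with h | h
        · exact h1 y (List.mem_cons_of_mem _ hy) h
        · exact hpw.1 y hy h.symm
      obtain ⟨hr, hs⟩ := ih (r ++ [x]) _ h1' hpw.2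
      refine ⟨by rw [hr]; simp, fun t => ?_⟩
      rw [hs t, PySem.Set.mem_add _ _ _]
      simp only [List.mem_cons]
      constructor
      · rintro ((h | h) | ⟨y, hy, hk⟩)
        · exact Or.inl h
        · exact Or.inr ⟨x, Or.inl rfl, h.symm⟩
        · exact Or.inr ⟨y, Or.inr hy, hk⟩
      · rintro (h | ⟨y, (rfl | hy), hk⟩)
        · exact Or.inl (Or.inl h)
        · exact Or.inl (Or.inr hk.symm)
        · exact Or.inr ⟨y, hy, hk⟩

-- when A's scan finds nothing to pop, B keeps the whole list
theorem pvAlt_fixed {cs : List (List Int)} (h : pvFindI cs cs.length 0 = none) :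
    cullDuplicateCalculations_alt cs = cs := by
  have hnm : ∀ a b : Nat, a < cs.length → b < cs.length → b ≠ a →
      pvMatch (cs.getD a []) (cs.getD b []) = false := by
    intro a b ha hb hne
    exact pvFindJ_none (pvFindI_none h a (Nat.zero_le _) (by omega)) b (Nat.zero_le _) (by omega) hne
  have hpw : cs.Pairwise (fun x y => pvKey x ≠ pvRKey y) := by
    rw [List.pairwise_iff_getElem]
    intro a b ha hb hab hk
    have := hnm a b ha hb (by omega)
    rw [List.getD_eq_getElem _ _ ha, List.getD_eq_getElem _ _ hb] at this
    rw [pvMatch_iff.2 hk] at this; simp at this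
  have := pvKeep_all cs [] PySem.Set.empty (by intro x _ hx; simp [PySem.Set.empty] at hx) hpw
  unfold cullDuplicateCalculations_alt
  rw [this.1]; simp

-- popping the list element A's scan finds does not change B's result
theorem pvAlt_erase {cs : List (List Int)} {j : Nat} (h : pvFindI cs cs.length 0 = some j) :
    cullDuplicateCalculations_alt (cs.eraseIdx j) = cullDuplicateCalculations_alt cs := by
  obtain ⟨i, -, hi', hj, hmin⟩ := pvFindI_some h
  have hi : i < cs.length := by omega
  obtain ⟨hjn', hjne, hm⟩ := pvFindJ_some hj
  have hjn : j < cs.length := by omega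
  -- every index below i is uninvolved
  have huninv : ∀ k, k < i → ∀ b, b < cs.length → b ≠ k →
      pvMatch (cs.getD k []) (cs.getD b []) = false := by
    intro k hk b hb hbk
    exact pvFindJ_none (hmin k (Nat.zero_le _) hk) b (Nat.zero_le _) (by omega) hbk
  -- i < j
  have hij : i < j := by
    rcases Nat.lt_or_ge i j with h' | h'
    · exact h'
    have hji : j < i := Nat.lt_of_le_of_ne h' (Ne.symm (by omega))
    have := huninv j hji i hi (Ne.symm hjne)
    have hm' : pvMatch (cs.getD j []) (cs.getD i []) = true := by
      rw [pvMatch_iff] at hm ⊢; exact pvMatch_symm.1 hm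
    rw [hm'] at this; simp at this
  -- decomposition cs = (u ++ cs[i] :: m) ++ cj :: t2 with cj := cs[j]
  obtain ⟨cj, hcj⟩ : ∃ x, cs[j]'hjn = x := ⟨_, rfl⟩
  have hmkey : pvKey cs[i] = pvRKey cj := by
    have := pvMatch_iff.1 hm
    rw [List.getD_eq_getElem _ _ hi, List.getD_eq_getElem _ _ hjn] at this
    rwa [hcj] at this
  have hkd : j - (i+1) < (cs.drop (i+1)).length := by rw [List.length_drop]; omega
  have hdk : (cs.drop (i+1))[j - (i+1)]'hkd = cj := by
    rw [← hcj]
    rw [List.getElem_drop]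
    congr 1; omega
  have hdsplit : cs.drop (i+1) = (cs.drop (i+1)).take (j-(i+1)) ++ cj :: cs.drop (j+1) := by
    conv_lhs => rw [← List.take_append_drop (j-(i+1)) (cs.drop (i+1))]
    have hidx : (i+1) + (j - (i+1) + 1) = j + 1 := by omega
    rw [List.drop_eq_getElem_cons hkd, hdk, List.drop_drop, hidx]
  have hcs : cs = (cs.take i ++ cs[i] :: (cs.drop (i+1)).take (j-(i+1))) ++ cj :: cs.drop (j+1) := by
    conv_lhs => rw [← List.take_append_drop i cs, List.drop_eq_getElem_cons hi, hdsplit]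
    simp
  have hlen : (cs.take i ++ cs[i] :: (cs.drop (i+1)).take (j-(i+1))).length = j := by
    simp; omega
  have herase : cs.eraseIdx j = (cs.take i ++ cs[i] :: (cs.drop (i+1)).take (j-(i+1))) ++ cs.drop (j+1) := by
    conv_lhs => rw [hcs]
    rw [List.eraseIdx_append_of_length_le (le_of_eq hlen), hlen]
    simp
  -- the reversed key of cj is seen after processing the part before it
  have hseen : pvRKey cj ∈
      ((cs.take i ++ cs[i] :: (cs.drop (i+1)).take (j-(i+1))).foldl pvCullStep ([], PySem.Set.empty)).2 := by
    -- all of cs.take i is kept; its seen-set is exactly its keys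
    have hpw : (cs.take i).Pairwise (fun x y => pvKey x ≠ pvRKey y) := by
      rw [List.pairwise_iff_getElem]
      intro a b ha hb hab hkk
      have ha' : a < i := by simp at ha; omega
      have hb' : b < i := by simp at hb; omega
      have hmm := huninv a ha' b (by omega) (by omega)
      rw [List.getD_eq_getElem _ _ (by omega : a < cs.length),
          List.getD_eq_getElem _ _ (by omega : b < cs.length)] at hmm
      rw [List.getElem_take, List.getElem_take] at hkk
      rw [pvMatch_iff.2 hkk] at hmm; simp at hmm
    obtain ⟨-, hsu⟩ := pvKeep_all (cs.take i) [] PySem.Set.empty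
      (by intro x _ hx; simp [PySem.Set.empty] at hx) hpw
    -- cs[i] is kept: its reversed key is not among those keys
    have hnotseen : pvRKey cs[i] ∉ ((cs.take i).foldl pvCullStep ([], PySem.Set.empty)).2 := by
      intro hmem
      rcases (hsu _).1 hmem with h' | ⟨x, hx, hkx⟩
      · simp [PySem.Set.empty] at h'
      · obtain ⟨a, ha, rfl⟩ := List.mem_iff_getElem.1 hx
        have ha' : a < i := by simp at ha; omega
        have hmm := huninv a ha' i hi (by omega)
        rw [List.getD_eq_getElem _ _ (by omega : a < cs.length),
            List.getD_eq_getElem _ _ hi] at hmm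
        rw [List.getElem_take] at hkx
        rw [pvMatch_iff.2 hkx] at hmm; simp at hmm
    rw [List.foldl_append, List.foldl_cons, pvCullStep_of_not_seen hnotseen]
    apply pvSeen_mono
    rw [← hmkey]
    exact (PySem.Set.mem_add _ _ _).2 (Or.inr rfl)
  unfold cullDuplicateCalculations_alt
  rw [herase]
  conv_rhs => rw [hcs]
  rw [pvSkip_glue _ _ _ _ hseen]

theorem pvLoop_eq : ∀ (fuel : Nat) (cs : List (List Int)), cs.length ≤ fuel →
    pvCullLoop fuel cs = cullDuplicateCalculations_alt cs := by
  intro fuel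
  induction fuel with
  | zero =>
      intro cs hlen
      have : cs = [] := List.length_eq_zero_iff.1 (by omega)
      subst this; rfl
  | succ fuel ih =>
      intro cs hlen
      rw [pvCullLoop]
      cases h : pvFindI cs cs.length 0 with
      | none =>
          show cs = _
          exact (pvAlt_fixed h).symm
      | some j =>
          show pvCullLoop fuel (cs.eraseIdx j) = _
          obtain ⟨i, -, -, hj, -⟩ := pvFindI_some h
          obtain ⟨hjn', -, -⟩ := pvFindJ_some hj
          have hjn : j < cs.length := by omega
          rw [ih _ (by rw [List.length_eraseIdx_of_lt hjn]; omega)]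
          exact pvAlt_erase h

-- ===== VERDICT (by name: the statement is the Claim_ definition above) =====
theorem cullDuplicateCalculations_spec : Claim_equal_cullDuplicateCalculations := by
  intro cs _ _
  unfold Spec_cullDuplicateCalculations cullDuplicateCalculations
  exact pvLoop_eq _ cs (by omega)
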